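-- pv_equiv track=rewrite | github.com/antoan2/kaggle-tgs-salt-identification | learning-tool/src/submission.py | exclude_files
-- ===== SOURCE A (Python) =====
-- def exclude_files(results, files_to_exclude):
--     filtered_results = {}
--     for sample_name, result in results.items():
--         if sample_name in files_to_exclude:
--             filtered_results[sample_name] = ''
--         else:
--             filtered_results[sample_name] = result
--     return filtered_results
-- ===== SOURCE B (Python) =====
-- def exclude_files(results, files_to_exclude):
--     filtered = dict(results)
--     for name in files_to_exclude:
--         if name in results:
--             filtered[name] = ''
--     return filtered
-- ===== Notes on version B (the rewrite author's own statement) =====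
-- stated objective: alternative
-- what changed: B drives the work from the exclusion side: it copies the dict once and overwrites each excluded key that is present, instead of scanning every result and testing list membership in files_to_exclude.
import Mathlib
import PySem

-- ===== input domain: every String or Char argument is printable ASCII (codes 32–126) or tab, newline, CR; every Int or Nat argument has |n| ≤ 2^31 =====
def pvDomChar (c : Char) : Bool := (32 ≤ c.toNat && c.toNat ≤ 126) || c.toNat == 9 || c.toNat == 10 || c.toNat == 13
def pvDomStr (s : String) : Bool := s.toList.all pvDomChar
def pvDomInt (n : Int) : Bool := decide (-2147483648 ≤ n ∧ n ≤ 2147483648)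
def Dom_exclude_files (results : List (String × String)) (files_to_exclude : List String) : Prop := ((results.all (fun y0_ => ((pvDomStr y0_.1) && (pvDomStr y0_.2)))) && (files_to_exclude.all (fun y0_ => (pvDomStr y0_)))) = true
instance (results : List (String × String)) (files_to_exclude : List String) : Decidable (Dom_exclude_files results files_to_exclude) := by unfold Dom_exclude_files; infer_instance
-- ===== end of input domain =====

-- B drives the loop from files_to_exclude over a one-time dict copy instead of scanning every result and testing list membership (a different decomposition of the same task).
-- ===== PORT A =====
def exclude_files (results : List (String × String)) (files_to_exclude : List String) : List (String × String) :=
  (results.foldl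
    (fun d p =>
      if files_to_exclude.contains p.1 then d.insert p.1 "" else d.insert p.1 p.2)
    PySem.Dict.empty).items

-- ===== PORT B =====
def exclude_files_alt (results : List (String × String)) (files_to_exclude : List String) : List (String × String) :=
  (files_to_exclude.foldl
    (fun d name =>
      if results.any (fun p => p.1 == name) then d.insert name "" else d)
    (results.foldl (fun d p => d.insert p.1 p.2) PySem.Dict.empty)).items

-- ===== PRECONDITION & SPEC =====
def Spec_exclude_files (results : List (String × String)) (files_to_exclude : List String) (out : List (String × String)) : Prop := out = exclude_files_alt results files_to_exclude
instance (results : List (String × String)) (files_to_exclude : List String) (out : List (String × String)) : Decidable (Spec_exclude_files results files_to_exclude out) := by unfold Spec_exclude_files; infer_instance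

-- ===== CLAIM (what is proved, stated in full; the proofs are below) =====
def Claim_equal_exclude_files : Prop := ∀ (results : List (String × String)) (files_to_exclude : List String), Dom_exclude_files results files_to_exclude → Spec_exclude_files results files_to_exclude (exclude_files results files_to_exclude)

-- ===== LEMMAS AND PROOFS =====

-- ===== VERDICT (by name: the statement is the Claim_ definition above) =====
-- value rewrite applied entrywise to a dict's items
def pvG (ex : List String) (p : String × String) : String × String :=
  (p.1, if ex.contains p.1 then "" else p.2)

theorem pvMapD_keys (ex : List String) (d : PySem.Dict String String) :
    (PySem.Dict.mk (d.items.map (pvG ex))).keys = d.keys := by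
  simp [PySem.Dict.keys, List.map_map, pvG, Function.comp]

theorem pvMapD_insert (ex : List String) (d : PySem.Dict String String) (k v : String) :
    (PySem.Dict.mk (d.items.map (pvG ex))).insert k (if ex.contains k then "" else v)
      = PySem.Dict.mk ((d.insert k v).items.map (pvG ex)) := by
  have hc : (PySem.Dict.mk (d.items.map (pvG ex))).contains k = d.contains k := by
    rw [PySem.Dict.contains_eq_decide_mem_keys, PySem.Dict.contains_eq_decide_mem_keys,
      pvMapD_keys]
  apply PySem.Dict.ext
  rw [PySem.Dict.items_insert, PySem.Dict.items_insert, hc]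
  by_cases h : d.contains k = true
  · simp only [h, if_true, List.map_map]
    refine List.map_congr_left fun p _ => ?_
    by_cases hp : p.1 = k <;> simp [pvG, hp, Function.comp]
  · simp only [Bool.not_eq_true] at h
    simp [h, pvG]

theorem pvA_fold (ex : List String) (rs : List (String × String)) (d : PySem.Dict String String) :
    rs.foldl
      (fun d p => if ex.contains p.1 then d.insert p.1 "" else d.insert p.1 p.2)
      (PySem.Dict.mk (d.items.map (pvG ex)))
    = PySem.Dict.mk ((rs.foldl (fun d p => d.insert p.1 p.2) d).items.map (pvG ex)) := by
  induction rs generalizing d with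
  | nil => rfl
  | cons p rs ih =>
    simp only [List.foldl_cons]
    have h1 : (if ex.contains p.1
          then (PySem.Dict.mk (d.items.map (pvG ex))).insert p.1 ""
          else (PySem.Dict.mk (d.items.map (pvG ex))).insert p.1 p.2)
        = PySem.Dict.mk ((d.insert p.1 p.2).items.map (pvG ex)) := by
      rw [← pvMapD_insert ex d p.1 p.2]
      by_cases h : p.1 ∈ ex <;> simp [h]
    rw [h1, ih]

theorem pvB_fold (results : List (String × String)) (ex : List String)
    (d : PySem.Dict String String)
    (hmem : ∀ n, d.contains n = results.any (fun p => p.1 == n)) :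
    ex.foldl
      (fun d name => if results.any (fun p => p.1 == name) then d.insert name "" else d) d
    = PySem.Dict.mk (d.items.map (pvG ex)) := by
  induction ex generalizing d with
  | nil =>
    apply PySem.Dict.ext
    have hid : List.map (pvG []) d.items = d.items := by
      simpa using List.map_congr_left (l := d.items) (g := id) (fun p _ => by simp [pvG])
    exact hid.symm
  | cons name rest ih =>
    simp only [List.foldl_cons]
    by_cases hg : results.any (fun p => p.1 == name) = true
    · rw [if_pos hg]
      have hcont : d.contains name = true := by rw [hmem]; exact hg
      rw [ih (d.insert name "") ?hm]
      case hm =>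
        intro n
        rw [PySem.Dict.contains_insert]
        by_cases hn : n = name
        · subst hn; simp [hg]
        · simp [hn, hmem]
      apply PySem.Dict.ext
      rw [PySem.Dict.items_insert_of_contains _ _ hcont]
      simp only [List.map_map]
      refine List.map_congr_left fun p _ => ?_
      by_cases hp : p.1 = name <;> simp [pvG, hp, Function.comp]
    · rw [if_neg hg]
      rw [ih d hmem]
      have hkeys : ∀ p ∈ d.items, p.1 ≠ name := by
        intro p hp he
        have : d.contains name = true := by
          rw [PySem.Dict.contains_iff_mem_keys]
          exact he ▸ PySem.Dict.mem_keys_of_mem_items d hp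
        rw [hmem] at this; exact hg this
      congr 1
      refine List.map_congr_left fun p hp => ?_
      simp [pvG, hkeys p hp]

theorem exclude_files_spec : Claim_equal_exclude_files := by
  intro results ex _
  unfold Spec_exclude_files exclude_files exclude_files_alt
  rw [pvB_fold results ex _ ?hm]
  case hm =>
    intro n
    rw [PySem.Dict.contains_eq_decide_mem_keys, PySem.Dict.keys_foldl_insert_key]
    rw [PySem.Dict.keys_empty, PySem.Set.update_nil_left, List.any_eq]
    congr 1
    rw [eq_iff_iff, PySem.Set.mem_ofList, List.mem_map]
    constructor
    · rintro ⟨p, hp, he⟩; exact ⟨p, hp, by simp [he]⟩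
    · rintro ⟨p, hp, he⟩; exact ⟨p, hp, by simpa using he⟩
  have h0 : PySem.Dict.mk (PySem.Dict.empty.items.map (pvG ex)) = PySem.Dict.empty := rfl
  have hA := pvA_fold ex results PySem.Dict.empty
  rw [h0] at hA
  rw [hA]
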